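-- pv_equiv track=rewrite | github.com/SiliconEngine/AdventOfCode2023-Python | Day12/day12_part1.py | chk_consist
-- ===== SOURCE A (Python) =====
-- def chk_consist(springs, counts):
--     chk_list = []
--     hash_count = 0
--     for c in springs:
--         if (c == ord('#')):
--             hash_count += 1
--         elif hash_count > 0:
--             chk_list.append(hash_count)
--             hash_count = 0
--
--     if hash_count > 0:
--         chk_list.append(hash_count)
--
--     return counts == chk_list
-- ===== SOURCE B (Python) =====
-- def chk_consist(springs, counts):
--     # run decomposition: peel one maximal run of equal elements at a time,
--     # record the lengths of the '#' runs, compare with counts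
--     xs = list(springs)
--     n = len(xs)
--     runs = []
--     i = 0
--     while i < n:
--         j = i + 1
--         while j < n and xs[j] == xs[i]:
--             j += 1
--         if xs[i] == ord('#'):
--             runs.append(j - i)
--         i = j
--     return counts == runs
-- ===== Notes on version B (the rewrite author's own statement) =====
-- stated objective: alternative
-- what changed: B decomposes the input recursively into maximal runs of equal elements (peeling each run with takeWhile/dropWhile) and keeps lengths of '#' runs, instead of A's single accumulator loop that increments on '#' and flushes on other characters.
import Mathlib
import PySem

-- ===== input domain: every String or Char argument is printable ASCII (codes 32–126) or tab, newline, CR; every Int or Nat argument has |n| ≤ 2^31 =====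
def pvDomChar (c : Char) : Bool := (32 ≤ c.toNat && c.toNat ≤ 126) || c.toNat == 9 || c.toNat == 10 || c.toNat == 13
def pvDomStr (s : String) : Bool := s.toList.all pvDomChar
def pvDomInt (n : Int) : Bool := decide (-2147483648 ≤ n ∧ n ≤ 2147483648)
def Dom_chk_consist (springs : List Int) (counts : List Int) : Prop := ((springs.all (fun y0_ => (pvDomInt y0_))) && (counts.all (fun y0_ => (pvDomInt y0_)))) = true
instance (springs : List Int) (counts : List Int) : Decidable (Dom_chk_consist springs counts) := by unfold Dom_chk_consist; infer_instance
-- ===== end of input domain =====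

-- B replaces A's running '#'-counter (flush on non-'#') with a recursive decomposition into maximal runs; alternative, same cost.


-- ===== PORT A =====
-- literal transliteration of A: fold over springs with state (chk_list, hash_count), final flush
def chk_consist (springs : List Int) (counts : List Int) : Bool :=
  let st := springs.foldl (fun (st : List Int × Int) c =>
    if c = 35 then (st.1, st.2 + 1)
    else if st.2 > 0 then (st.1 ++ [st.2], 0)
    else st) ([], 0)
  let chk_list := if st.2 > 0 then st.1 ++ [st.2] else st.1
  counts == chk_list

-- ===== PORT B =====
-- literal transliteration of Source B's hash_runs: peel one maximal run at a time
def hashRuns : List Int → List Int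
  | [] => []
  | c :: rest =>
    let grp := rest.takeWhile (fun x => x == c)
    let rest' := rest.dropWhile (fun x => x == c)
    if c == 35 then ((grp.length : Int) + 1) :: hashRuns rest' else hashRuns rest'
termination_by xs => xs.length
decreasing_by
  all_goals
    simp only [List.length_cons]
    have := List.length_dropWhile_le (fun x => x == c) rest
    omega

def chk_consist_alt (springs : List Int) (counts : List Int) : Bool :=
  counts == hashRuns springs

-- ===== PRECONDITION & SPEC =====
def Spec_chk_consist (springs : List Int) (counts : List Int) (out : Bool) : Prop := out = chk_consist_alt springs counts
instance (springs : List Int) (counts : List Int) (out : Bool) : Decidable (Spec_chk_consist springs counts out) := by unfold Spec_chk_consist; infer_instance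

-- ===== CLAIM (what is proved, stated in full; the proofs are below) =====
def Claim_equal_chk_consist : Prop := ∀ (springs : List Int) (counts : List Int), Dom_chk_consist springs counts → Spec_chk_consist springs counts (chk_consist springs counts)

-- ===== LEMMAS AND PROOFS =====

-- specification of the '#'-run lengths of xs given h pending hashes
def runsG : Int → List Int → List Int
  | h, [] => if h > 0 then [h] else []
  | h, c :: rest => if c = 35 then runsG (h + 1) rest
      else if h > 0 then h :: runsG 0 rest else runsG 0 rest

theorem foldl_runsG (springs acc : List Int) (h : Int) (hh : 0 ≤ h) :
    (let st := springs.foldl (fun (st : List Int × Int) c =>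
      if c = 35 then (st.1, st.2 + 1)
      else if st.2 > 0 then (st.1 ++ [st.2], 0)
      else st) (acc, h)
     if st.2 > 0 then st.1 ++ [st.2] else st.1) = acc ++ runsG h springs := by
  induction springs generalizing acc h with
  | nil =>
    simp only [List.foldl_nil, runsG]
    split <;> simp
  | cons c rest ih =>
    simp only [List.foldl_cons, runsG]
    by_cases hc : c = 35
    · simp only [hc, if_true]
      exact ih acc (h + 1) (by omega)
    · simp only [if_neg hc]
      by_cases hp : h > 0
      · simp only [if_pos hp]
        rw [ih (acc ++ [h]) 0 le_rfl]
        simp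
      · simp only [if_neg hp]
        have h0 : h = 0 := by omega
        subst h0
        exact ih acc 0 le_rfl

theorem runsG_pos (xs : List Int) (h : Int) (hp : 0 < h) :
    runsG h xs = (h + (xs.takeWhile (fun x => x == (35 : Int))).length) ::
      runsG 0 (xs.dropWhile (fun x => x == (35 : Int))) := by
  induction xs generalizing h with
  | nil => simp [runsG, if_pos hp]
  | cons c rest ih =>
    by_cases hc : c = 35
    · subst hc
      simp only [runsG, List.takeWhile_cons, List.dropWhile_cons, BEq.rfl,
        if_true, List.length_cons]
      rw [ih (h + 1) (by omega)]
      congr 1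
      push_cast
      ring
    · have hb : ((c == (35 : Int)) = false) := by simp [hc]
      simp [runsG, hc, if_pos hp, hb]

theorem runsG_skip (xs : List Int) (c : Int) (hc : c ≠ 35) :
    runsG 0 (xs.dropWhile (fun x => x == c)) = runsG 0 xs := by
  induction xs with
  | nil => simp
  | cons x rest ih =>
    by_cases hx : x = c
    · subst hx
      simp only [List.dropWhile_cons, BEq.rfl, if_true]
      rw [ih]
      simp [runsG, hc]
    · have hb : ((x == c) = false) := by simp [hx]
      simp [hb]

theorem hashRuns_eq_runsG_len : ∀ (n : Nat) (xs : List Int), xs.length ≤ n →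
    hashRuns xs = runsG 0 xs := by
  intro n
  induction n with
  | zero =>
    intro xs hx
    have : xs = [] := by
      cases xs with
      | nil => rfl
      | cons a b => simp at hx
    subst this
    simp [hashRuns, runsG]
  | succ n ih =>
    intro xs hx
    cases xs with
    | nil => simp [hashRuns, runsG]
    | cons c rest =>
      have hlen : (rest.dropWhile (fun x => x == c)).length ≤ n := by
        have := List.length_dropWhile_le (fun x => x == c) rest
        simp only [List.length_cons] at hx
        omega
      rw [hashRuns]
      by_cases hc : c = 35
      · subst hc
        simp only [BEq.rfl, if_true]
        rw [ih _ hlen]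
        have : runsG 0 (35 :: rest) = runsG 1 rest := by simp [runsG]
        rw [this, runsG_pos rest 1 (by omega)]
        congr 1
        ring
      · have hb : ((c == (35 : Int)) = false) := by simp [hc]
        rw [hb]
        simp only [Bool.false_eq_true, if_false]
        rw [ih _ hlen, runsG_skip rest c hc]
        simp [runsG, hc]

theorem hashRuns_eq_runsG (xs : List Int) : hashRuns xs = runsG 0 xs :=
  hashRuns_eq_runsG_len xs.length xs le_rfl

-- ===== VERDICT (by name: the statement is the Claim_ definition above) =====
theorem chk_consist_spec : Claim_equal_chk_consist := by
  intro springs counts _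
  have h2 := foldl_runsG springs [] 0 le_rfl
  simp only [List.nil_append] at h2
  simp only [Spec_chk_consist, chk_consist, chk_consist_alt, hashRuns_eq_runsG]
  rw [h2]
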